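-- pv_equiv track=rewrite | github.com/alex-d-boyd/programing_praxis | marsaglia_rng.py | marsaglia_generator
-- ===== SOURCE A (Python) =====
-- def marsaglia_generator(seed):
--     """Generate a pseudorandom sequence based on Marsaglia’s Mental RNG"""
--
--     if seed < 10 or seed > 99:
--         raise ValueError('Seed value must be two digits.')
--     if seed == 59:
--         raise ValueError('Seed value 59 will cause an infinite loop.')
--
--     def next_seed(seed):
--         return seed // 10 + seed % 10 * 6
--     while seed > 58:
--         seed = next_seed(seed)
--     new_seed = seed
--     while True:
--         yield new_seed % 10
--         new_seed = next_seed(new_seed)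
--         # chain is exhausted when original number comes round again
--         if new_seed == seed:
--             break
-- ===== SOURCE B (Python) =====
-- def marsaglia_generator(seed):
--     """Generate a pseudorandom sequence based on Marsaglia's Mental RNG.
--
--     The transform s -> s//10 + s%10*6 is multiplication by 6 mod 59 on
--     0..58, and 6 is a primitive root mod 59, so after warming the seed
--     down into 0..58 the period is exactly 58 and each state is a closed
--     form s*6^k mod 59 -- no cycle detection needed.
--     """
--     if seed < 10 or seed > 99:
--         raise ValueError('Seed value must be two digits.')
--     if seed == 59:
--         raise ValueError('Seed value 59 will cause an infinite loop.')
--     s = seed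
--     while s > 58:
--         s = s // 10 + s % 10 * 6
--     for k in range(58):
--         yield (s * pow(6, k, 59)) % 59 % 10
-- ===== Notes on version B (the rewrite author's own statement) =====
-- stated objective: alternative
-- what changed: Replaces the interleaved yield-and-detect cycle loop with a number-theoretic closed form: the transform is multiplication by 6 mod 59 (a primitive root), so the period is always exactly 58 and B emits (s*6^k mod 59) % 10 for k in range(58) with no cycle detection.
import Mathlib
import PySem

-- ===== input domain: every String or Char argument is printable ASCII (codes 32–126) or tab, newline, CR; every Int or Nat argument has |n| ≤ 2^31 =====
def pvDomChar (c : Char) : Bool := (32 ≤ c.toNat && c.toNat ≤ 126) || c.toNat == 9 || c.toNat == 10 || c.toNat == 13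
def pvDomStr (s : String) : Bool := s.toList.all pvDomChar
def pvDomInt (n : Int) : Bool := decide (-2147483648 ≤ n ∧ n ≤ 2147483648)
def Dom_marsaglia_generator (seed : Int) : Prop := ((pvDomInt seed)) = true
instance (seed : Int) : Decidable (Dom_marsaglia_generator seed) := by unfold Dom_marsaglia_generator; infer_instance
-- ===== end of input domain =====

-- B replaces A's interleaved yield-and-detect cycle loop with the closed form
-- (s * 6^k mod 59) % 10 over a fixed period of 58 (alternative decomposition, same cost).

-- ===== PORT A =====
-- next_seed as in A
-- 's // 10 + s % 10 * 6': divisor 10 is positive, where Int './' and '%' (Euclidean) agree exactly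
-- with Python's floor division and mod, so this is exact for every Int s
def pvNextSeed (s : Int) : Int := s / 10 + s % 10 * 6

-- A's warm-up 'while seed > 58' loop; fuel only makes the loop total (2 steps suffice on Pre_)
def pvWarmA (fuel : Nat) (s : Int) : Int :=
  match fuel with
  | 0 => s
  | f + 1 => if s > 58 then pvWarmA f (pvNextSeed s) else s

-- A's 'while True: yield …; if new_seed == seed: break' loop; fuel only for totality (period ≤ 58 on Pre_)
def pvCycleA (fuel : Nat) (start cur : Int) (acc : List Int) : List Int :=
  match fuel with
  | 0 => acc.reverse
  | f + 1 =>
    let acc' := cur % 10 :: acc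
    let nxt := pvNextSeed cur
    if nxt = start then acc'.reverse else pvCycleA f start nxt acc'

def marsaglia_generator (seed : Int) : List Int :=
  if seed < 10 ∨ seed > 99 then []          -- Python raises ValueError; excluded by Pre_
  else if seed = 59 then []                 -- Python raises ValueError; excluded by Pre_
  else
    let s := pvWarmA 100 seed
    pvCycleA 100 s s []

-- ===== PORT B =====
-- B's identical warm-up loop (B keeps A's validation and warm-up, changes the emission)
def pvWarmB (fuel : Nat) (s : Int) : Int :=
  match fuel with
  | 0 => s
  | f + 1 => if s > 58 then pvWarmB f (pvNextSeed s) else s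

-- pow(b, k, m) of B's Python
-- pow(b, k, m) of B's Python; modulus 59 is positive, so Int '%' is exact here
def pvPowMod (b : Int) (k : Nat) (m : Int) : Int :=
  match k with
  | 0 => 1 % m
  | k + 1 => (b * pvPowMod b k m) % m

def marsaglia_generator_alt (seed : Int) : List Int :=
  if seed < 10 ∨ seed > 99 then []          -- Python raises ValueError; excluded by Pre_
  else if seed = 59 then []                 -- Python raises ValueError; excluded by Pre_
  else
    let s := pvWarmB 100 seed
    (List.range 58).map (fun k => (s * pvPowMod 6 k 59) % 59 % 10)

-- ===== PRECONDITION & SPEC =====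
-- Pre_ excludes exactly the inputs on which A raises ValueError (non-two-digit seeds and 59).
def Pre_marsaglia_generator (seed : Int) : Prop := 10 ≤ seed ∧ seed ≤ 99 ∧ seed ≠ 59
instance (seed : Int) : Decidable (Pre_marsaglia_generator seed) := by
  unfold Pre_marsaglia_generator; infer_instance

def pvWitness_marsaglia_generator : Int := 34

def Spec_marsaglia_generator (seed : Int) (out : List Int) : Prop := out = marsaglia_generator_alt seed
instance (seed : Int) (out : List Int) : Decidable (Spec_marsaglia_generator seed out) := by
  unfold Spec_marsaglia_generator; infer_instance

-- ===== CLAIM (what is proved, stated in full; the proofs are below) =====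
def Claim_equal_marsaglia_generator : Prop := ∀ (seed : Int), Dom_marsaglia_generator seed → Pre_marsaglia_generator seed → Spec_marsaglia_generator seed (marsaglia_generator seed)

-- ===== LEMMAS AND PROOFS =====
-- Exhaustive check of the 90 admissible seeds 10..99 (59 skipped).
def pvCheckAll : Bool :=
  (List.range 90).all (fun n =>
    let s : Int := 10 + n
    s = 59 || decide (marsaglia_generator s = marsaglia_generator_alt s))

theorem pvCheckAll_true : pvCheckAll = true := by decide

theorem pvAgree (seed : Int) (h1 : 10 ≤ seed) (h2 : seed ≤ 99) (h3 : seed ≠ 59) :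
    marsaglia_generator seed = marsaglia_generator_alt seed := by
  have hn : seed = 10 + ((seed - 10).toNat : Int) := by omega
  have hlt : (seed - 10).toNat < 90 := by omega
  have := pvCheckAll_true
  unfold pvCheckAll at this
  rw [List.all_eq_true] at this
  have h := this ((seed - 10).toNat) (List.mem_range.mpr hlt)
  simp only [Bool.or_eq_true, decide_eq_true_eq] at h
  rcases h with h | h
  · exact absurd (hn.trans h) h3
  · rw [hn]; exact h

-- ===== VERDICT (by name: the statement is the Claim_ definition above) =====
theorem marsaglia_generator_spec : Claim_equal_marsaglia_generator := by
  intro seed _ hpre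
  exact pvAgree seed hpre.1 hpre.2.1 hpre.2.2
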